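-- pv_equiv track=rewrite | github.com/nichnikov/tax_tags_stend | utility.py | replaceAscriptor
-- ===== SOURCE A (Python) =====
-- def replaceAscriptor(src: [], asc: [], desc: []):
--     src_repl = []
--     length = len(asc)
--     src_ = [src[i:i + length] for i in range(0, len(src), 1)]
--     i = 0
--     while i < len(src_):
--         if src_[i] == asc:
--             src_repl = src_repl + desc
--             i += length
--         else:
--             src_repl.append(src_[i][0])
--             i += 1
--     return src_repl
-- ===== SOURCE B (Python) =====
-- def replaceAscriptor(src: [], asc: [], desc: []):
--     res = []
--     L = len(asc)
--     n = len(src)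
--     i = 0
--     while True:
--         j = i
--         while j < n and src[j:j + L] != asc:
--             j += 1
--         res.extend(src[i:j])
--         if j < n:
--             res.extend(desc)
--             i = j + L
--         else:
--             return res
-- ===== Notes on version B (the rewrite author's own statement) =====
-- stated objective: faster
-- what changed: B processes src in segments - it scans forward for the next match position and copies each unmatched block at once via slicing - instead of A's per-element loop over a precomputed table of all n slices src[i:i+len(asc)]; B never materialises that O(n*m) slice table.
import Mathlib
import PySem

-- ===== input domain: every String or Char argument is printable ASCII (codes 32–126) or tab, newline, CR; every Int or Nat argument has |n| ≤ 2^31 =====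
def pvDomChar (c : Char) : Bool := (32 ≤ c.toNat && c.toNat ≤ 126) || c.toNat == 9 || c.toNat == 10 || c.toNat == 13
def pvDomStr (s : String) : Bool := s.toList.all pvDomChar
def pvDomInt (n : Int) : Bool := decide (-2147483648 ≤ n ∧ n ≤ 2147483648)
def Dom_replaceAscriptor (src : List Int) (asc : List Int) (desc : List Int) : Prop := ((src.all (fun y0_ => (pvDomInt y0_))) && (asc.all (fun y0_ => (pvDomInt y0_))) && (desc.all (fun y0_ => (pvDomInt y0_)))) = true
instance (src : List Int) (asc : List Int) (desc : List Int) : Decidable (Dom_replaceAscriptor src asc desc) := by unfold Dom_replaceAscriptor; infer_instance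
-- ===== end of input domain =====

-- B replaces A's element-wise walk over a precomputed table of all slices src[i:i+len(asc)]
-- by a segment scan: find the next match position, copy the whole unmatched block with one slice.
-- Equivalence is claimed on Pre_ (asc ≠ [] or src = []); on asc = [] with src ≠ [] the Python A
-- never returns (its loop advances i by len(asc) = 0 forever), and Python B loops forever there too.

-- ===== PORT A =====
-- while loop of A; fuel is a totality guard only: with asc ≠ [] the loop makes at most
-- len(src_) steps plus the final test, so fuel = len(src_) + 1 is enough.
-- src_[i] is ported as (pyGet? src_ ↑i).getD [] (the loop guard i < len(src_) keeps it in range),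
-- and src_[i][0] as .headD 0 (under the guard the slice is nonempty whenever asc ≠ []).
def replaceAscriptorLoop (src_ : List (List Int)) (asc : List Int) (desc : List Int)
    (length : Nat) : Nat → Nat → List Int → List Int
  | 0, _, src_repl => src_repl
  | fuel + 1, i, src_repl =>
    if i < src_.length then
      if (PySem.List.pyGet? src_ (i : Int)).getD [] = asc then
        replaceAscriptorLoop src_ asc desc length fuel (i + length) (src_repl ++ desc)
      else
        replaceAscriptorLoop src_ asc desc length fuel (i + 1)
          (src_repl ++ [((PySem.List.pyGet? src_ (i : Int)).getD []).headD 0])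
    else src_repl

def replaceAscriptor (src : List Int) (asc : List Int) (desc : List Int) : List Int :=
  let length := asc.length
  -- range(0, len(src), 1) enumerates 0,…,len(src)-1
  let src_ := (List.range src.length).map
    (fun (i : Nat) => PySem.List.slice src (some (i : Int)) (some ((i : Int) + (length : Int))))
  replaceAscriptorLoop src_ asc desc length (src_.length + 1) 0 []

-- ===== PORT B =====
-- inner while: scan j forward to the next position where src[j:j+L] == asc (or stop at n)
def altScan (src : List Int) (asc : List Int) (L n : Nat) (j : Nat) : Nat :=
  if j < n ∧ PySem.List.slice src (some (j : Int)) (some ((j : Int) + (L : Int))) ≠ asc then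
    altScan src asc L n (j + 1)
  else j
termination_by n - j

-- outer while True; fuel is a totality guard only: with asc ≠ [] each continuing round
-- strictly increases i and the loop returns once the scan reaches n, so n + 1 rounds suffice.
def altLoop (src : List Int) (asc : List Int) (desc : List Int) (L n : Nat) :
    Nat → Nat → List Int → List Int
  | 0, _, res => res
  | fuel + 1, i, res =>
    -- j := altScan …; res := res ++ src[i:j] (written inline)
    if altScan src asc L n i < n then
      altLoop src asc desc L n fuel (altScan src asc L n i + L)
        ((res ++ PySem.List.slice src (some (i : Int)) (some ((altScan src asc L n i : Nat) : Int))) ++ desc)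
    else res ++ PySem.List.slice src (some (i : Int)) (some ((altScan src asc L n i : Nat) : Int))

def replaceAscriptor_alt (src : List Int) (asc : List Int) (desc : List Int) : List Int :=
  altLoop src asc desc asc.length src.length (src.length + 1) 0 []

-- ===== PRECONDITION & SPEC =====
-- Pre_ excludes asc = [] with src ≠ []: there the Python A never returns (the loop advances
-- i by len(asc) = 0 forever), so A has no value to match; B also loops forever there.
def Pre_replaceAscriptor (src : List Int) (asc : List Int) (desc : List Int) : Prop :=
  asc ≠ [] ∨ src = []
instance (src : List Int) (asc : List Int) (desc : List Int) : Decidable (Pre_replaceAscriptor src asc desc) := by unfold Pre_replaceAscriptor; infer_instance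

def pvWitness_replaceAscriptor : List Int × List Int × List Int :=
  ([1, 2, 3, 2, 3, 4], [2, 3], [9, 9, 9])

def Spec_replaceAscriptor (src : List Int) (asc : List Int) (desc : List Int) (out : List Int) : Prop := out = replaceAscriptor_alt src asc desc
instance (src : List Int) (asc : List Int) (desc : List Int) (out : List Int) : Decidable (Spec_replaceAscriptor src asc desc out) := by unfold Spec_replaceAscriptor; infer_instance

-- ===== CLAIM (what is proved, stated in full; the proofs are below) =====
def Claim_equal_replaceAscriptor : Prop := ∀ (src : List Int) (asc : List Int) (desc : List Int), Dom_replaceAscriptor src asc desc → Pre_replaceAscriptor src asc desc → Spec_replaceAscriptor src asc desc (replaceAscriptor src asc desc)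

-- ===== LEMMAS AND PROOFS =====

-- reference function: structural recursion on the suffix of src
def refRepl (asc desc : List Int) : List Int → List Int
  | [] => []
  | a :: t =>
    if h : asc ≠ [] ∧ asc <+: (a :: t) then
      desc ++ refRepl asc desc ((a :: t).drop asc.length)
    else
      a :: refRepl asc desc t
termination_by s => s.length
decreasing_by
  · have h1 : 0 < asc.length := List.length_pos_of_ne_nil h.1
    simp [List.length_drop]; omega
  · simp

theorem refRepl_pos (asc desc s : List Int) (h : asc ≠ []) (hp : asc <+: s) :
    refRepl asc desc s = desc ++ refRepl asc desc (s.drop asc.length) := by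
  match s with
  | [] => exact absurd (List.prefix_nil.mp hp) h
  | a :: t => rw [refRepl]; simp [h, hp]

theorem refRepl_neg (asc desc : List Int) (a : Int) (t : List Int) (hp : ¬ asc <+: a :: t) :
    refRepl asc desc (a :: t) = a :: refRepl asc desc t := by
  rw [refRepl]; simp [hp]

theorem slice_drop_take (src : List Int) (i L : Nat) :
    PySem.List.slice src (some (i : Int)) (some ((i : Int) + (L : Int))) =
      (src.drop i).take L :=
  PySem.List.slice_natCast_add src i L

theorem prefix_iff_slice (src asc : List Int) (i : Nat) :
    (PySem.List.slice src (some (i : Int)) (some ((i : Int) + (asc.length : Int))) = asc)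
      ↔ asc <+: src.drop i := by
  rw [slice_drop_take, List.prefix_iff_eq_take]
  constructor <;> intro h <;> exact h.symm

theorem drop_cons_getElem (src : List Int) (i : Nat) (hi : i < src.length) :
    src.drop i = src[i] :: src.drop (i + 1) :=
  (List.getElem_cons_drop hi).symm

theorem drop_add (src : List Int) (i L : Nat) :
    (src.drop i).drop L = src.drop (i + L) := by
  rw [List.drop_drop, Nat.add_comm]

-- A-side: the loop with enough fuel computes acc ++ refRepl (src.drop i)
theorem aLoop_eq (src asc desc : List Int) (hasc : asc ≠ []) :
    ∀ fuel i acc, src.length - i < fuel →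
      replaceAscriptorLoop
        ((List.range src.length).map
          (fun (k : Nat) => PySem.List.slice src (some (k : Int)) (some ((k : Int) + (asc.length : Int)))))
        asc desc asc.length fuel i acc = acc ++ refRepl asc desc (src.drop i) := by
  have hL : 0 < asc.length := List.length_pos_of_ne_nil hasc
  intro fuel
  induction fuel with
  | zero => intro i acc h; omega
  | succ f ih =>
    intro i acc h
    rw [replaceAscriptorLoop, List.length_map, List.length_range]
    by_cases hi : i < src.length
    · rw [if_pos hi]
      have hget : (PySem.List.pyGet?
          ((List.range src.length).map
            (fun (k : Nat) => PySem.List.slice src (some (k : Int)) (some ((k : Int) + (asc.length : Int)))))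
          (i : Int)).getD []
          = PySem.List.slice src (some (i : Int)) (some ((i : Int) + (asc.length : Int))) := by
        rw [PySem.List.pyGet?_natCast]; simp [hi]
      rw [hget]
      by_cases hmatch : PySem.List.slice src (some (i : Int)) (some ((i : Int) + (asc.length : Int))) = asc
      · have hp : asc <+: src.drop i := (prefix_iff_slice src asc i).mp hmatch
        rw [if_pos hmatch, ih (i + asc.length) (acc ++ desc) (by omega)]
        rw [refRepl_pos asc desc _ hasc hp, drop_add, List.append_assoc]
      · have hp : ¬ asc <+: src.drop i := fun hp =>
          hmatch ((prefix_iff_slice src asc i).mpr hp)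
        rw [if_neg hmatch, ih (i + 1) _ (by omega)]
        have hdrop := drop_cons_getElem src i hi
        have hhead : (PySem.List.slice src (some (i : Int)) (some ((i : Int) + (asc.length : Int)))).headD 0 = src[i] := by
          obtain ⟨m, hm⟩ : ∃ m, asc.length = m + 1 := ⟨asc.length - 1, by omega⟩
          rw [slice_drop_take, hm, hdrop, List.take_succ_cons]
          rfl
        rw [hhead]
        conv_rhs => rw [hdrop, refRepl_neg asc desc _ _ (hdrop ▸ hp)]
        simp only [List.append_assoc, List.singleton_append]
    · rw [if_neg hi]
      have hnil : src.drop i = [] := List.drop_eq_nil_of_le (by omega)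
      rw [hnil]
      simp [refRepl]

-- B-side: the scan never moves backwards
theorem altScan_ge (src asc : List Int) (L n : Nat) :
    ∀ j, j ≤ altScan src asc L n j := by
  intro j
  rw [altScan]
  split
  · have := altScan_ge src asc L n (j + 1); omega
  · omega
termination_by j => n - j
decreasing_by rename_i h; omega

-- B-side: one scanned segment of refRepl
theorem altScan_seg (src asc desc : List Int) (hasc : asc ≠ []) :
    ∀ j, refRepl asc desc (src.drop j) =
        PySem.List.slice src (some (j : Int)) (some ((altScan src asc asc.length src.length j : Nat) : Int)) ++
          (if altScan src asc asc.length src.length j < src.length then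
            desc ++ refRepl asc desc (src.drop (altScan src asc asc.length src.length j + asc.length))
          else []) := by
  intro j
  rw [altScan]
  split
  · rename_i hcond
    obtain ⟨hj, hne⟩ := hcond
    have hIH := altScan_seg src asc desc hasc (j + 1)
    have hp : ¬ asc <+: src.drop j := fun hp =>
      hne ((prefix_iff_slice src asc j).mpr hp)
    have hdrop := drop_cons_getElem src j hj
    have hk1 : j + 1 ≤ altScan src asc asc.length src.length (j + 1) :=
      altScan_ge src asc asc.length src.length (j + 1)
    have hslice : PySem.List.slice src (some (j : Int)) (some ((altScan src asc asc.length src.length (j+1) : Nat) : Int)) =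
        src[j] :: PySem.List.slice src (some ((j+1 : Nat) : Int)) (some ((altScan src asc asc.length src.length (j+1) : Nat) : Int)) := by
      rw [PySem.List.slice_natCast, PySem.List.slice_natCast, hdrop]
      have hstep : altScan src asc asc.length src.length (j+1) - j =
          (altScan src asc asc.length src.length (j+1) - (j+1)) + 1 := by omega
      rw [hstep, List.take_succ_cons]
    conv_lhs => rw [hdrop, refRepl_neg asc desc _ _ (hdrop ▸ hp)]
    rw [hIH, hslice]
    simp only [List.cons_append]
  · rename_i hcond
    have hslice : PySem.List.slice src (some (j : Int)) (some (j : Int)) = ([] : List Int) := by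
      rw [PySem.List.slice_natCast]; simp
    by_cases hj : j < src.length
    · have hne : PySem.List.slice src (some (j : Int)) (some ((j : Int) + (asc.length : Int))) = asc := by
        by_contra hc; exact hcond ⟨hj, hc⟩
      have hp : asc <+: src.drop j := (prefix_iff_slice src asc j).mp hne
      rw [refRepl_pos asc desc _ hasc hp, hslice, if_pos hj, drop_add, List.nil_append]
    · have hnil : src.drop j = [] := List.drop_eq_nil_of_le (by omega)
      rw [hnil, hslice, if_neg hj]
      simp [refRepl]
termination_by j => src.length - j
decreasing_by rename_i h; omega

-- B-side: the outer loop with enough fuel computes acc ++ refRepl (src.drop i)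
theorem bLoop_eq (src asc desc : List Int) (hasc : asc ≠ []) :
    ∀ fuel i acc, src.length - i < fuel →
      altLoop src asc desc asc.length src.length fuel i acc =
        acc ++ refRepl asc desc (src.drop i) := by
  have hL : 0 < asc.length := List.length_pos_of_ne_nil hasc
  intro fuel
  induction fuel with
  | zero => intro i acc h; omega
  | succ f ih =>
    intro i acc h
    have hseg := altScan_seg src asc desc hasc i
    have hge := altScan_ge src asc asc.length src.length i
    rw [altLoop]
    by_cases hk : altScan src asc asc.length src.length i < src.length
    · rw [if_pos hk, ih (altScan src asc asc.length src.length i + asc.length) _ (by omega)]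
      rw [hseg, if_pos hk]
      simp only [List.append_assoc]
    · rw [if_neg hk, hseg, if_neg hk, List.append_nil]

theorem ports_agree_nonempty (src asc desc : List Int) (hasc : asc ≠ []) :
    replaceAscriptor src asc desc = replaceAscriptor_alt src asc desc := by
  unfold replaceAscriptor replaceAscriptor_alt
  simp only [List.length_map, List.length_range]
  rw [aLoop_eq src asc desc hasc (src.length + 1) 0 [] (by omega),
      bLoop_eq src asc desc hasc (src.length + 1) 0 [] (by omega)]

theorem ports_agree_nil_src (asc desc : List Int) :
    replaceAscriptor [] asc desc = replaceAscriptor_alt [] asc desc := by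
  unfold replaceAscriptor replaceAscriptor_alt
  rw [altLoop]
  simp [replaceAscriptorLoop, altScan, PySem.List.slice_to]

-- ===== VERDICT (by name: the statement is the Claim_ definition above) =====
theorem replaceAscriptor_spec : Claim_equal_replaceAscriptor := by
  intro src asc desc _ hpre
  unfold Spec_replaceAscriptor
  rcases hpre with hasc | hsrc
  · exact ports_agree_nonempty src asc desc hasc
  · subst hsrc; exact ports_agree_nil_src asc desc
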